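-- pv_equiv track=rewrite | github.com/ashioyajotham/Coding-Challenges-Interviews | Spring 2020/sambaTV.py | solution
-- ===== SOURCE A (Python) =====
-- def solution(S):
--     # write your code in Python 3.6
--
--     leftB = []
--     bSoFar = 0
--     for i in range(len(S)):
--         leftB += [bSoFar]
--
--         if S[i] == 'B':
--             bSoFar += 1
--
--
--     rightA = [0] * len(S)
--     aSoFar = 0
--     for j in range(len(S)-1, -1, -1):
--         rightA[j] = aSoFar
--
--         if S[j] == 'A':
--             aSoFar += 1
--
--     minDelete = len(S)
--
--     for i in range(len(S)):
--         if (rightA[i] + leftB[i] < minDelete):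
--             minDelete = rightA[i] + leftB[i]
--
--     return minDelete
-- ===== SOURCE B (Python) =====
-- def solution(S):
--     # single-pass DP: b = number of 'B' seen so far, res = min deletions so far
--     res = 0
--     b = 0
--     for ch in S:
--         if ch == 'B':
--             b += 1
--         elif ch == 'A':
--             res = min(res + 1, b)
--     return res
-- ===== Notes on version B (the rewrite author's own statement) =====
-- stated objective: faster
-- what changed: Replaced the three passes (leftB prefix array, rightA suffix array, final min-scan over their sums) by a single left-to-right DP keeping only a running B-count and the running optimal deletion count (res = min(res+1, b) on each 'A'), eliminating both auxiliary arrays.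
import Mathlib
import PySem

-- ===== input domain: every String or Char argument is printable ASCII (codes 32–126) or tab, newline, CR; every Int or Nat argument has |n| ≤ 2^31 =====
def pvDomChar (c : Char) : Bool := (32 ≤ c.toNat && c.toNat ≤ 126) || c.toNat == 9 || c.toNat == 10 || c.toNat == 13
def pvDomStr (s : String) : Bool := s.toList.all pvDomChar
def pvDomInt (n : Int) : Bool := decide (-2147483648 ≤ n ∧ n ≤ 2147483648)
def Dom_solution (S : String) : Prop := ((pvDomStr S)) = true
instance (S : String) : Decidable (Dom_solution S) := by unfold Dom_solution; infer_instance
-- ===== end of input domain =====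

-- B replaces A's three passes (prefix-B array, suffix-A array, min-scan) by one pass with two scalars; objective: faster (constant-factor: no auxiliary arrays).

-- ===== PORT A =====
-- loop bodies of A's three 'for' loops (indexing via pyGetD/pySetD: every index used is in range, so no IndexError arises)
def bodyLeft (l : List Char) (st : List Int × Int) (i : Int) : List Int × Int :=
  (st.1 ++ [st.2], if PySem.List.pyGetD l i ' ' = 'B' then st.2 + 1 else st.2)

def bodyRight (l : List Char) (st : List Int × Int) (j : Int) : List Int × Int :=
  (PySem.List.pySetD st.1 j st.2, if PySem.List.pyGetD l j ' ' = 'A' then st.2 + 1 else st.2)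

def bodyMin (rightA leftB : List Int) (m : Int) (i : Int) : Int :=
  if PySem.List.pyGetD rightA i 0 + PySem.List.pyGetD leftB i 0 < m
  then PySem.List.pyGetD rightA i 0 + PySem.List.pyGetD leftB i 0 else m

def solution (S : String) : Int :=
  let l := S.toList
  let n : Int := (l.length : Int)
  let st1 := (PySem.List.pyRange 0 n).foldl (bodyLeft l) ([], 0)
  let leftB := st1.1
  let st2 := (PySem.List.pyRange (n - 1) (-1) (-1)).foldl (bodyRight l)
      (List.replicate l.length (0 : Int), 0)
  let rightA := st2.1
  (PySem.List.pyRange 0 n).foldl (bodyMin rightA leftB) n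

-- ===== PORT B =====
def solution_alt (S : String) : Int :=
  (S.toList.foldl
    (fun (st : Int × Int) ch =>
      if ch = 'B' then (st.1, st.2 + 1)
      else if ch = 'A' then (min (st.1 + 1) st.2, st.2)
      else st)
    (0, 0)).1

-- ===== PRECONDITION & SPEC =====
def Spec_solution (S : String) (out : Int) : Prop := out = solution_alt S
instance (S : String) (out : Int) : Decidable (Spec_solution S out) := by unfold Spec_solution; infer_instance

-- ===== CLAIM (what is proved, stated in full; the proofs are below) =====
def Claim_equal_solution : Prop := ∀ (S : String), Dom_solution S → Spec_solution S (solution S)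

-- ===== LEMMAS AND PROOFS =====

-- number of 'A' / 'B' in a list, as Int
def cntA (l : List Char) : Int := (l.count 'A' : Int)
def cntB (l : List Char) : Int := (l.count 'B' : Int)

-- the common value of both programs: min over cut points k of (#B before k + #A from k on)
def minCut : List Char → Int
  | [] => 0
  | c :: t => if c = 'B' then min (cntA t) (1 + minCut t) else minCut t

lemma minCut_le_cntA (l : List Char) : minCut l ≤ cntA l := by
  induction l with
  | nil => simp [minCut, cntA]
  | cons c t ih =>
    have hc2 : cntA t ≤ cntA (c :: t) := by
      simp only [cntA, List.count_cons]
      split_ifs <;> push_cast <;> omega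
    by_cases hc : c = 'B'
    · have h1 : minCut (c :: t) = min (cntA t) (1 + minCut t) := by
        simp only [minCut, if_pos hc]
      rw [h1]
      omega
    · have h1 : minCut (c :: t) = minCut t := by
        simp only [minCut, if_neg hc]
      rw [h1]
      omega

-- ---------- B side ----------
lemma alt_inv (l : List Char) : ∀ res b : Int, res ≤ b →
    (l.foldl
      (fun (st : Int × Int) ch =>
        if ch = 'B' then (st.1, st.2 + 1)
        else if ch = 'A' then (min (st.1 + 1) st.2, st.2)
        else st)
      (res, b)).1 = min (res + cntA l) (b + minCut l) := by
  induction l with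
  | nil => intro res b h; simp [cntA, minCut]; omega
  | cons ch t ih =>
    intro res b h
    have hm := minCut_le_cntA t
    by_cases hB : ch = 'B'
    · rw [List.foldl_cons, if_pos hB]
      rw [ih res (b + 1) (by omega)]
      simp [hB, cntA, minCut] at hm ⊢
      omega
    · by_cases hA : ch = 'A'
      · rw [List.foldl_cons, if_neg hB, if_pos hA]
        rw [ih (min (res + 1) b) b (by omega)]
        simp [hA, cntA, minCut] at hm ⊢
        omega
      · rw [List.foldl_cons, if_neg hB, if_neg hA]
        rw [ih res b h]
        have h1 : (ch == 'A') = false := by simpa using hA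
        have h2 : (ch == 'B') = false := by simpa using hB
        simp [cntA, minCut, List.count_cons, h1, hB]

lemma alt_eq (S : String) : solution_alt S = minCut S.toList := by
  unfold solution_alt
  rw [alt_inv S.toList 0 0 le_rfl]
  have := minCut_le_cntA S.toList
  omega

-- ---------- A side ----------
-- value A compares at index j: #A strictly right of j plus #B strictly left of j
def cost (l : List Char) (j : Nat) : Int := cntA (l.drop (j + 1)) + cntB (l.take j)

lemma leftB_spec (l : List Char) : ∀ k, k ≤ l.length →
    ((List.range k).map (fun (j : Nat) => (j : Int))).foldl (bodyLeft l) ([], 0)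
      = ((List.range k).map (fun i => cntB (l.take i)), cntB (l.take k)) := by
  intro k
  induction k with
  | zero => intro _; simp [cntB]
  | succ k ih =>
    intro hk
    have hkl : k < l.length := by omega
    rw [List.range_succ, List.map_append, List.map_append, List.foldl_append, ih (by omega)]
    have hget : PySem.List.pyGetD l (k : Int) ' ' = l[k] := by
      rw [PySem.List.pyGetD_natCast, List.getD_eq_getElem?_getD, List.getElem?_eq_getElem hkl]
      rfl
    have htake : l.take (k + 1) = l.take k ++ [l[k]] := by
      rw [List.take_add_one, List.getElem?_eq_getElem hkl]; rfl
    simp only [List.map_cons, List.map_nil, List.foldl_cons, List.foldl_nil, bodyLeft, hget]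
    have hcnt : cntB (l.take (k + 1))
        = if l[k] = 'B' then cntB (l.take k) + 1 else cntB (l.take k) := by
      rw [cntB, cntB, htake, List.count_append]
      by_cases hB : l[k] = 'B'
      · simp [hB]
      · have h2 : (l[k] == 'B') = false := by simpa using hB
        simp [hB]
    rw [Prod.mk.injEq]
    exact ⟨by simp, by rw [hcnt]⟩

lemma set_map_range (f : Nat → Int) (n m : Nat) (v : Int) :
    ((List.range n).map f).set m v = (List.range n).map (fun i => if i = m then v else f i) := by
  apply List.ext_getElem (by simp)
  intro i h1 h2
  simp only [List.getElem_set, List.getElem_map, List.getElem_range]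
  split_ifs with hmi hie hie
  · rfl
  · exact absurd hmi.symm hie
  · exact absurd hie.symm hmi
  · rfl

lemma rightA_spec (l : List Char) : ∀ k, k ≤ l.length →
    ((List.range k).map (fun (j : Nat) => ((l.length : Int) - 1 - (j : Int)))).foldl (bodyRight l)
        (List.replicate l.length (0 : Int), 0)
      = ((List.range l.length).map
            (fun i => if l.length - k ≤ i then cntA (l.drop (i + 1)) else 0),
         cntA (l.drop (l.length - k))) := by
  intro k
  induction k with
  | zero =>
    intro _
    simp only [List.range_zero, List.map_nil, List.foldl_nil]
    rw [Prod.mk.injEq]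
    constructor
    · have hmap : (List.range l.length).map
          (fun i => if l.length - 0 ≤ i then cntA (l.drop (i + 1)) else 0)
          = (List.range l.length).map (fun _ => (0 : Int)) := by
        apply List.map_congr_left
        intro i hi
        rw [List.mem_range] at hi
        rw [if_neg (by omega)]
      rw [hmap, List.map_const', List.length_range]
    · rw [Nat.sub_zero, List.drop_length]
      rfl
  | succ k ih =>
    intro hk
    have hkl : k < l.length := by omega
    set n := l.length with hn
    have hj : ((n : Int) - 1 - (k : Int)) = ((n - 1 - k : Nat) : Int) := by omega
    rw [List.range_succ, List.map_append, List.foldl_append, ih (by omega)]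
    have hidx : n - 1 - k < n := by omega
    have hget : PySem.List.pyGetD l (((n - 1 - k : Nat) : Int)) ' ' = l[n - 1 - k] := by
      rw [PySem.List.pyGetD_natCast, List.getD_eq_getElem?_getD,
        List.getElem?_eq_getElem hidx]
      rfl
    have hdrop : l.drop (n - 1 - k) = l[n - 1 - k] :: l.drop (n - k) := by
      have := List.drop_eq_getElem_cons (i := n - 1 - k) (l := l) hidx
      rwa [show n - 1 - k + 1 = n - k by omega] at this
    simp only [List.map_cons, List.map_nil, List.foldl_cons, List.foldl_nil, bodyRight, hget, hj,
      PySem.List.pySetD_natCast]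
    rw [Prod.mk.injEq]
    constructor
    · rw [set_map_range]
      apply List.map_congr_left
      intro i hi
      rw [List.mem_range] at hi
      by_cases hie : i = n - 1 - k
      · subst hie
        rw [if_pos rfl, if_pos (by omega), show n - 1 - k + 1 = n - k by omega]
      · rw [if_neg hie]
        by_cases hge : n - k ≤ i
        · rw [if_pos hge, if_pos (by omega)]
        · rw [if_neg hge, if_neg (by omega)]
    · rw [show n - (k + 1) = n - 1 - k by omega, hdrop]
      by_cases hA : l[n - 1 - k] = 'A'
      · simp [hA, cntA]
      · have h2 : (l[n - 1 - k] == 'A') = false := by simpa using hA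
        simp [hA, cntA]

-- foldl-min algebra
lemma fold_min_acc (v : List Int) : ∀ a b : Int, v.foldl min (min a b) = min a (v.foldl min b) := by
  induction v with
  | nil => intro a b; rfl
  | cons x v ih =>
    intro a b
    simp only [List.foldl_cons]
    rw [min_assoc, ih]

lemma fold_min_map_add (v : List Int) : ∀ a d : Int,
    (v.map (· + d)).foldl min (a + d) = v.foldl min a + d := by
  induction v with
  | nil => intro a d; rfl
  | cons x v ih =>
    intro a d
    simp only [List.map_cons, List.foldl_cons]
    rw [min_add_add_right, ih]

lemma vals_cons_B (t : List Char) :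
    (List.range ('B' :: t).length).map (cost ('B' :: t))
      = cntA t :: ((List.range t.length).map (cost t)).map (· + 1) := by
  rw [List.length_cons, List.range_succ_eq_map, List.map_cons, List.map_map, List.map_map]
  rw [List.cons_eq_cons]
  constructor
  · simp [cost, cntA, cntB]
  · apply List.map_congr_left
    intro j _
    simp only [Function.comp_apply, cost, Nat.succ_eq_add_one, List.drop_succ_cons,
      List.take_succ_cons, cntB, List.count_cons]
    simp
    ring

lemma vals_cons_other (ch : Char) (t : List Char) (hB : ch ≠ 'B') :
    (List.range (ch :: t).length).map (cost (ch :: t))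
      = cntA t :: (List.range t.length).map (cost t) := by
  rw [List.length_cons, List.range_succ_eq_map, List.map_cons, List.map_map]
  rw [List.cons_eq_cons]
  constructor
  · simp [cost, cntA, cntB]
  · apply List.map_congr_left
    intro j _
    have h2 : (ch == 'B') = false := by simpa using hB
    simp only [Function.comp_apply, cost, Nat.succ_eq_add_one, List.drop_succ_cons,
      List.take_succ_cons, cntB, List.count_cons, h2]
    simp

lemma fold_cost_eq_minCut (l : List Char) :
    ((List.range l.length).map (cost l)).foldl min (l.length : Int) = minCut l := by
  induction l with
  | nil => simp [minCut]
  | cons ch t ih =>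
    have hcA : cntA t ≤ (t.length : Int) := by
      have := List.count_le_length (l := t) (a := 'A')
      unfold cntA; exact_mod_cast this
    by_cases hB : ch = 'B'
    · subst hB
      rw [vals_cons_B, List.foldl_cons, List.length_cons,
        show ((t.length + 1 : Nat) : Int) = (t.length : Int) + 1 by push_cast; ring,
        min_comm ((t.length : Int) + 1) (cntA t), fold_min_acc, fold_min_map_add, ih]
      simp [minCut]
      omega
    · rw [vals_cons_other ch t hB, List.foldl_cons, List.length_cons,
        show min (((t.length + 1 : Nat) : Int)) (cntA t) = min (cntA t) ((t.length : Int)) by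
          push_cast; omega,
        fold_min_acc, ih]
      have := minCut_le_cntA t
      simp [minCut, hB]
      omega

lemma sol_eq (S : String) : solution S = minCut S.toList := by
  simp only [solution]
  set l := S.toList with hl
  set n := l.length with hn
  rw [PySem.List.pyRange_zero_nat, leftB_spec l n le_rfl]
  rw [PySem.List.pyRange_neg_one,
    show (((n : Nat) : Int) - 1 - (-1)).toNat = n by omega,
    rightA_spec l n le_rfl]
  dsimp only
  rw [List.foldl_map]
  have hfold := fold_cost_eq_minCut l
  rw [List.foldl_map, ← hn] at hfold
  rw [← hfold]
  apply PySem.List.foldl_congr_mem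
  intro m j hj
  rw [List.mem_range] at hj
  have hA : PySem.List.pyGetD ((List.range l.length).map
      (fun i => if l.length - n ≤ i then cntA (l.drop (i + 1)) else 0)) (j : Int) 0
      = cntA (l.drop (j + 1)) := by
    rw [PySem.List.pyGetD_natCast, List.getD_eq_getElem?_getD,
      List.getElem?_eq_getElem (by simp only [List.length_map, List.length_range, ← hn]; exact hj)]
    simp only [List.getElem_map, List.getElem_range]
    rw [if_pos (by rw [← hn]; omega)]
    rfl
  have hBv : PySem.List.pyGetD ((List.range n).map (fun i => cntB (l.take i))) (j : Int) 0
      = cntB (l.take j) := by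
    rw [PySem.List.pyGetD_natCast, List.getD_eq_getElem?_getD,
      List.getElem?_eq_getElem (by simpa using hj)]
    simp
  rw [bodyMin, hA, hBv]
  unfold cost
  split_ifs <;> omega

-- ===== VERDICT (by name: the statement is the Claim_ definition above) =====
theorem solution_spec : Claim_equal_solution := by
  intro S _
  unfold Spec_solution
  rw [sol_eq, alt_eq]
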